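-- pv_equiv track=rewrite | github.com/natalieagus/2025-10020-SC09 | Week03/recursive-examples/heap_search.py | search_heap
-- ===== SOURCE A (Python) =====
-- def search_heap(heap, index, target):
--     if index >= len(heap):
--         return False
--     if heap[index] > target:
--         return False  # Prune branch in min-heap
--     if heap[index] == target:
--         return True
--     left = 2 * index + 1
--     right = 2 * index + 2
--     return search_heap(heap, left, target) or search_heap(heap, right, target)
-- ===== SOURCE B (Python) =====
-- def search_heap(heap, index, target):
--     n = len(heap)
--     frontier = [index]
--     while frontier:
--         live = [i for i in frontier if 0 <= i < n and heap[i] <= target]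
--         if any(heap[i] == target for i in live):
--             return True
--         frontier = [c for i in live for c in (2 * i + 1, 2 * i + 2)]
--     return False
-- ===== Notes on version B (the rewrite author's own statement) =====
-- stated objective: alternative
-- what changed: Replaces the recursive pruned DFS by a level-by-level breadth-first traversal: each iteration filters the whole frontier level to its live (in-range, value <= target) indices, tests the level at once for the target, and builds the next level by a flatMap over the live indices.
-- outside the precondition, e.g. on search_heap([5], -1, 5): A returns True, B returns False; on search_heap([1, 2], -1, 3): A raises RecursionError, B returns False; on search_heap([], -1, 3): A raises IndexError, B returns False
import Mathlib
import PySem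

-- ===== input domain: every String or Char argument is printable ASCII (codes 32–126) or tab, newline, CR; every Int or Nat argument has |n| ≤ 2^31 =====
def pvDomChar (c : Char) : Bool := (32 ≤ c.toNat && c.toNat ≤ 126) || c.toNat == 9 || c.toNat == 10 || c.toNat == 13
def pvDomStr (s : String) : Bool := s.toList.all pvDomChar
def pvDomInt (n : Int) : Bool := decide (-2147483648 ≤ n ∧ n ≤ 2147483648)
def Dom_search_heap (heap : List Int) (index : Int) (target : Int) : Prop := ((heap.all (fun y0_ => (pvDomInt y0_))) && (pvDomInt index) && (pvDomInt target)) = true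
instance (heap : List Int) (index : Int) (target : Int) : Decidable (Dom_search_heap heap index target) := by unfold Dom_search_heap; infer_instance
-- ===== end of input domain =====

-- B replaces A's recursive pruned DFS by a level-by-level breadth-first traversal built
-- with filter / any / flatMap over whole frontier levels (objective: alternative).

-- ===== PORT A =====
-- A is recursive; on the admitted inputs (0 ≤ index) the recursion depth is bounded by
-- heap.length + 1 (the index strictly increases each level), so fuel heap.length + 1 makes
-- the port total and exact there. The `none` branch of pyGet? (IndexError) is unreachable
-- under Pre_.
def search_heap_go (heap : List Int) (target : Int) : Nat → Int → Bool
  | 0, _ => false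
  | f + 1, index =>
    if (heap.length : Int) ≤ index then false
    else
      match PySem.List.pyGet? heap index with
      | none => false
      | some v =>
        if target < v then false
        else if v = target then true
        else search_heap_go heap target f (2 * index + 1) || search_heap_go heap target f (2 * index + 2)

def search_heap (heap : List Int) (index : Int) (target : Int) : Bool :=
  search_heap_go heap target (heap.length + 1) index

-- ===== PORT B =====
-- B's while-loop over whole levels, as recursion on a fuel bounding the number of levels
-- (the least frontier index grows by at least 1 per level, so heap.length levels suffice;
-- the 0-fuel branch is unreachable).  heap[i] in the comprehensions is in range when
-- evaluated (the 0 <= i < n guard short-circuits before it in Python), so `.getD 0` is exact.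
def search_heap_alt_go (heap : List Int) (target : Int) : Nat → List Int → Bool
  | 0, _ => false
  | f + 1, frontier =>
    if frontier.isEmpty then false
    else
      let live := frontier.filter (fun i =>
        decide (0 ≤ i) && decide (i < (heap.length : Int)) &&
        decide ((PySem.List.pyGet? heap i).getD 0 ≤ target))
      if live.any (fun i => (PySem.List.pyGet? heap i).getD 0 == target) then true
      else search_heap_alt_go heap target f (live.flatMap (fun i => [2 * i + 1, 2 * i + 2]))

def search_heap_alt (heap : List Int) (index : Int) (target : Int) : Bool :=
  search_heap_alt_go heap target (heap.length + 1) [index]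

-- ===== PRECONDITION & SPEC =====
-- Pre_ excludes negative start indices: there Python's negative-index wraparound makes A
-- search from arbitrary wrapped positions, so A raises IndexError or RecursionError on most
-- such inputs and on the rest returns a value accidental to the wraparound; B's bounds check
-- treats them uniformly as outside the tree and returns False.
def Pre_search_heap (heap : List Int) (index : Int) (target : Int) : Prop := 0 ≤ index
instance (heap : List Int) (index : Int) (target : Int) : Decidable (Pre_search_heap heap index target) := by unfold Pre_search_heap; infer_instance

def pvWitness_search_heap : List Int × Int × Int := ([1, 3, 2, 7, 4], 0, 7)

def Spec_search_heap (heap : List Int) (index : Int) (target : Int) (out : Bool) : Prop := out = search_heap_alt heap index target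
instance (heap : List Int) (index : Int) (target : Int) (out : Bool) : Decidable (Spec_search_heap heap index target out) := by unfold Spec_search_heap; infer_instance

-- ===== CLAIM (what is proved, stated in full; the proofs are below) =====
def Claim_equal_search_heap : Prop := ∀ (heap : List Int) (index : Int) (target : Int), Dom_search_heap heap index target → Pre_search_heap heap index target → Spec_search_heap heap index target (search_heap heap index target)

-- ===== LEMMAS AND PROOFS =====

-- A's recursion is fuel-insensitive once the fuel covers the remaining levels.
theorem search_heap_go_stable (heap : List Int) (target : Int) :
    ∀ (f f' : Nat) (i : Int), 0 ≤ i → (heap.length : Int) ≤ i + f → (heap.length : Int) ≤ i + f' →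
      search_heap_go heap target f i = search_heap_go heap target f' i := by
  intro f
  induction f with
  | zero =>
    intro f' i hi h0 h'
    cases f' with
    | zero => rfl
    | succ f' => rw [search_heap_go, search_heap_go, if_pos (by omega)]
  | succ f ih =>
    intro f' i hi h0 h'
    cases f' with
    | zero => rw [search_heap_go, search_heap_go, if_pos (by omega)]
    | succ f' =>
      rw [search_heap_go, search_heap_go]
      by_cases hle : (heap.length : Int) ≤ i
      · rw [if_pos hle, if_pos hle]
      · rw [if_neg hle, if_neg hle]
        cases hv : PySem.List.pyGet? heap i with
        | none => rfl
        | some v =>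
          dsimp only
          by_cases h1 : target < v
          · rw [if_pos h1, if_pos h1]
          · rw [if_neg h1, if_neg h1]
            by_cases h2 : v = target
            · rw [if_pos h2, if_pos h2]
            · rw [if_neg h2, if_neg h2]
              rw [ih f' (2 * i + 1) (by omega) (by omega) (by omega),
                  ih f' (2 * i + 2) (by omega) (by omega) (by omega)]

-- What A computes at one index (the reference value of a frontier entry).
def bref (heap : List Int) (target : Int) (i : Int) : Bool :=
  if i < 0 then false else search_heap_go heap target (heap.length + 1) i

theorem bref_nonneg (heap : List Int) (target : Int) (i : Int) (h : 0 ≤ i) :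
    bref heap target i = search_heap_go heap target (heap.length + 1) i := by
  unfold bref
  rw [if_neg (by omega)]

-- One BFS level, unfolded: A's answer over a frontier = "target found on the live part
-- of this level" or A's answer over the next level.
theorem frontier_step (heap : List Int) (target : Int) :
    ∀ (frontier : List Int), (∀ i ∈ frontier, 0 ≤ i) →
      frontier.any (bref heap target)
        = ((frontier.filter (fun i =>
              decide (0 ≤ i) && decide (i < (heap.length : Int)) &&
              decide ((PySem.List.pyGet? heap i).getD 0 ≤ target))).any
             (fun i => (PySem.List.pyGet? heap i).getD 0 == target)
           || ((frontier.filter (fun i =>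
                 decide (0 ≤ i) && decide (i < (heap.length : Int)) &&
                 decide ((PySem.List.pyGet? heap i).getD 0 ≤ target))).flatMap
                (fun i => [2 * i + 1, 2 * i + 2])).any (bref heap target)) := by
  intro frontier
  induction frontier with
  | nil => intro _; rfl
  | cons i rest ih =>
    intro hpos
    have hi : 0 ≤ i := hpos i (by simp)
    have hrest := ih (fun j hj => hpos j (by simp [hj]))
    rw [List.any_cons, List.filter_cons]
    by_cases hrange : i < (heap.length : Int)
    · obtain ⟨v, hv⟩ : ∃ v, PySem.List.pyGet? heap i = some v := by
        cases hv : PySem.List.pyGet? heap i with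
        | none =>
          rw [PySem.List.pyGet?_eq_none_iff] at hv
          unfold PySem.Raise.InRange at hv
          omega
        | some v => exact ⟨v, rfl⟩
      by_cases hle : v ≤ target
      · -- i is live
        have hcond : (decide (0 ≤ i) && decide (i < (heap.length : Int)) &&
            decide ((PySem.List.pyGet? heap i).getD 0 ≤ target)) = true := by
          simp only [hv, Option.getD_some]
          simp [hi, hrange, hle]
        rw [if_pos hcond, List.any_cons, List.flatMap_cons, List.any_append]
        have hbref : bref heap target i =
            (if v = target then true
             else bref heap target (2 * i + 1) || bref heap target (2 * i + 2)) := by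
          rw [bref_nonneg heap target i hi, search_heap_go, if_neg (by omega), hv]
          dsimp only
          rw [if_neg (by omega)]
          by_cases h2 : v = target
          · rw [if_pos h2, if_pos h2]
          · rw [if_neg h2, if_neg h2,
                bref_nonneg heap target (2 * i + 1) (by omega),
                bref_nonneg heap target (2 * i + 2) (by omega),
                search_heap_go_stable heap target heap.length (heap.length + 1) (2 * i + 1)
                  (by omega) (by omega) (by omega),
                search_heap_go_stable heap target heap.length (heap.length + 1) (2 * i + 2)
                  (by omega) (by omega) (by omega)]
        by_cases h2 : v = target
        · have heq : ((PySem.List.pyGet? heap i).getD 0 == target) = true := by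
            simp [hv, h2]
          rw [hbref, if_pos h2, heq]
          simp
        · have heq : ((PySem.List.pyGet? heap i).getD 0 == target) = false := by
            simp [hv, h2]
          rw [hbref, if_neg h2, heq, hrest]
          simp only [List.any_cons, List.any_nil, Bool.or_false, Bool.false_or]
          rw [Bool.or_left_comm]
      · -- i pruned: value > target
        have hcond : (decide (0 ≤ i) && decide (i < (heap.length : Int)) &&
            decide ((PySem.List.pyGet? heap i).getD 0 ≤ target)) = false := by
          simp only [hv, Option.getD_some]
          simp [hle]
        have hbref : bref heap target i = false := by
          unfold bref
          rw [if_neg (by omega), search_heap_go, if_neg (by omega), hv]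
          dsimp only
          rw [if_pos (by omega)]
        rw [if_neg (by simp [hcond]), hbref, Bool.false_or, hrest]
    · -- i out of range
      have hcond : (decide (0 ≤ i) && decide (i < (heap.length : Int)) &&
          decide ((PySem.List.pyGet? heap i).getD 0 ≤ target)) = false := by
        simp [hrange]
      have hbref : bref heap target i = false := by
        unfold bref
        rw [if_neg (by omega), search_heap_go, if_pos (by omega)]
      rw [if_neg (by simp [hcond]), hbref, Bool.false_or, hrest]

-- With enough fuel (all frontier indices ≥ m and m + fuel ≥ len), B's loop computes
-- exactly "A would find the target from some frontier index".
theorem alt_go_eq_any (heap : List Int) (target : Int) :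
    ∀ (f : Nat) (m : Int) (frontier : List Int), 0 ≤ m → (∀ i ∈ frontier, m ≤ i) →
      (heap.length : Int) ≤ m + f →
      search_heap_alt_go heap target f frontier = frontier.any (bref heap target) := by
  intro f
  induction f with
  | zero =>
    intro m frontier hm hall hlen
    rw [search_heap_alt_go]
    symm
    rw [List.any_eq_false]
    intro i himem
    have := hall i himem
    unfold bref
    rw [if_neg (by omega), search_heap_go, if_pos (by omega)]
    simp
  | succ f ih =>
    intro m frontier hm hall hlen
    rw [search_heap_alt_go]
    by_cases hemp : frontier.isEmpty
    · rw [if_pos hemp]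
      rw [List.isEmpty_iff] at hemp
      simp [hemp]
    · rw [if_neg hemp]
      have hpos : ∀ i ∈ frontier, 0 ≤ i := fun i hi => le_trans hm (hall i hi)
      rw [frontier_step heap target frontier hpos]
      dsimp only
      split_ifs with hfound
      · rw [hfound, Bool.true_or]
      · rw [Bool.not_eq_true] at hfound
        rw [hfound, Bool.false_or]
        apply ih (m + 1) _ (by omega) _ (by omega)
        intro c hc
        rw [List.mem_flatMap] at hc
        obtain ⟨j, hj, hcj⟩ := hc
        have hjm : m ≤ j := hall j (List.mem_of_mem_filter hj)
        simp only [List.mem_cons, List.not_mem_nil, or_false] at hcj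
        rcases hcj with rfl | rfl <;> omega

-- ===== VERDICT (by name: the statement is the Claim_ definition above) =====
theorem search_heap_spec : Claim_equal_search_heap := by
  intro heap index target _ hpre
  unfold Pre_search_heap at hpre
  unfold Spec_search_heap search_heap search_heap_alt
  rw [alt_go_eq_any heap target (heap.length + 1) 0 [index] (by omega)
        (by intro i hi; simp only [List.mem_singleton] at hi; omega) (by omega)]
  simp [bref, not_lt.mpr hpre]
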